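-- pv_equiv track=rewrite | github.com/vmkmym/Algorithm | 프로그래머스/3/12987. 숫자 게임/숫자 게임.py | solution
-- ===== SOURCE A (Python) =====
-- from bisect import bisect_right
--
-- def solution(A, B):
--     B.sort()
--     count = 0
--     for a in A:
--         index = bisect_right(B, a) # a보다 큰 값이 처음 나오는 인덱스, 없으면 len(B)
--         if index < len(B):
--             del B[index]
--             count += 1
--         else: # a보다 큰 값이 없으면 가장 작은 값을 제거
--             del B[0]
--     return count
-- ===== SOURCE B (Python) =====
-- def solution(A, B):
--     # Two-pointer greedy over sorted copies (return-value equivalence only: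
--     # A mutates B in place by sorting and deleting; B only sorts B in place).
--     A_sorted = sorted(A)
--     B.sort()
--     count = 0
--     i = 0
--     for b in B:
--         if i < len(A_sorted) and A_sorted[i] < b:
--             count += 1
--             i += 1
--     return count
-- ===== Notes on version B (the rewrite author's own statement) =====
-- stated objective: faster
-- what changed: Replaces A's per-element bisect_right plus O(n) list deletion on a live copy of B by sorting A as well and counting wins in a single two-pointer sweep over sorted B.
import Mathlib
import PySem

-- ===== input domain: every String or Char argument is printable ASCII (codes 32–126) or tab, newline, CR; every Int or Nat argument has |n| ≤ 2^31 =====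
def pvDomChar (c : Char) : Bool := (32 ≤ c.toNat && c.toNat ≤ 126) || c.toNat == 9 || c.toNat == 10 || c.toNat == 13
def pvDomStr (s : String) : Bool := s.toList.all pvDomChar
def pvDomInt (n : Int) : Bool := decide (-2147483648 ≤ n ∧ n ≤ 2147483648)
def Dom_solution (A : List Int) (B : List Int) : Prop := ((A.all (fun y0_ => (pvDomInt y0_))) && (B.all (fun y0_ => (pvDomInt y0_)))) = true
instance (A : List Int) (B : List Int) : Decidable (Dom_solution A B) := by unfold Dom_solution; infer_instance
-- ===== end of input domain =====

-- B replaces A's per-element bisect + O(n) delete on a live list by a single two-pointer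
-- sweep over both sorted lists (objective: faster). Return-value equivalence only:
-- Python A mutates B in place (sorts it and deletes elements); Python B only sorts B in place.

-- ===== PORT A =====
def solution (A : List Int) (B : List Int) : Int :=
  -- B.sort(); for a in A: index = bisect_right(B, a); if index < len(B): del B[index]; count += 1 else: del B[0]
  (A.foldl (fun (st : Int × List Int) a =>
      let index := PySem.List.bisectRight st.2 a
      if index < st.2.length then (st.1 + 1, st.2.eraseIdx index)
      else (st.1, st.2.eraseIdx 0))
    ((0 : Int), PySem.List.sorted B (fun x => x))).1

-- ===== PORT B =====
def solution_alt (A : List Int) (B : List Int) : Int :=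
  let As := PySem.List.sorted A (fun x => x)
  let Bs := PySem.List.sorted B (fun x => x)
  (Bs.foldl (fun (st : Int × Nat) b =>
      if st.2 < As.length ∧ As.getD st.2 0 < b then (st.1 + 1, st.2 + 1) else st)
    ((0 : Int), (0 : Nat))).1

-- ===== PRECONDITION & SPEC =====
-- Pre_ excludes len(A) > len(B): there Python A exhausts B and 'del B[0]' raises IndexError.
def Pre_solution (A : List Int) (B : List Int) : Prop := A.length ≤ B.length
instance (A : List Int) (B : List Int) : Decidable (Pre_solution A B) := by unfold Pre_solution; infer_instance
def pvWitness_solution : List Int × List Int := ([5, 1, 3], [2, 4, 6])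

def Spec_solution (A : List Int) (B : List Int) (out : Int) : Prop := out = solution_alt A B
instance (A : List Int) (B : List Int) (out : Int) : Decidable (Spec_solution A B out) := by unfold Spec_solution; infer_instance

-- ===== CLAIM (what is proved, stated in full; the proofs are below) =====
def Claim_equal_solution : Prop := ∀ (A : List Int) (B : List Int), Dom_solution A B → Pre_solution A B → Spec_solution A B (solution A B)

-- ===== LEMMAS AND PROOFS =====

-- One iteration of A's loop: (1 if a win was counted else 0, the remaining list).
def stepA (a : Int) (Bs : List Int) : Int × List Int :=
  if PySem.List.bisectRight Bs a < Bs.length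
  then (1, Bs.eraseIdx (PySem.List.bisectRight Bs a)) else (0, Bs.eraseIdx 0)

-- A's whole loop as structural recursion on A.
def runA : List Int → List Int → Int × List Int
  | [], Bs => (0, Bs)
  | a :: A, Bs =>
      let s := stepA a Bs
      let r := runA A s.2
      (s.1 + r.1, r.2)

-- B's two-pointer sweep as structural recursion on Bs, consuming the head of As on a win.
def tp : List Int → List Int → Int
  | _, [] => 0
  | [], _ :: _ => 0
  | a :: As, b :: Bs => if a < b then 1 + tp As Bs else tp (a :: As) Bs

theorem foldl_runA (A : List Int) : ∀ (Bs : List Int) (c : Int),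
    A.foldl (fun (st : Int × List Int) a =>
      let index := PySem.List.bisectRight st.2 a
      if index < st.2.length then (st.1 + 1, st.2.eraseIdx index)
      else (st.1, st.2.eraseIdx 0)) (c, Bs)
    = (c + (runA A Bs).1, (runA A Bs).2) := by
  induction A with
  | nil => intro Bs c; simp [runA]
  | cons a A ih =>
      intro Bs c
      simp only [List.foldl_cons]
      by_cases h : PySem.List.bisectRight Bs a < Bs.length <;>
        simp only [runA, stepA, h, if_pos, if_neg, not_false_iff] <;>
        rw [ih] <;> ring_nf

theorem bisect_match (a : Int) (L : List Int) (d : Int) (D' : List Int)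
    (hL : ∀ l ∈ L, l ≤ a) (hd : a < d)
    (hs : (L ++ d :: D').Pairwise (· ≤ ·)) :
    PySem.List.bisectRight (L ++ d :: D') a = L.length := by
  obtain ⟨h1, h2, h3⟩ := PySem.List.bisectRight_spec (L ++ d :: D') a hs
  set k := PySem.List.bisectRight (L ++ d :: D') a with hk
  rcases lt_trichotomy k L.length with h | h | h
  · exfalso
    have hklen : k < (L ++ d :: D').length := by simp; omega
    have := h3 k hklen le_rfl
    have : (L ++ d :: D')[k] ∈ L := by
      rw [List.getElem_append_left h]
      exact List.getElem_mem _
    have := hL _ this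
    have := h3 k hklen le_rfl
    omega
  · exact h
  · exfalso
    have hlen : L.length < (L ++ d :: D').length := by simp
    have := h2 L.length hlen h
    rw [List.getElem_append_right le_rfl] at this
    simp at this
    omega

theorem stepA_match (a : Int) (L : List Int) (d : Int) (D' : List Int)
    (hL : ∀ l ∈ L, l ≤ a) (hd : a < d)
    (hs : (L ++ d :: D').Pairwise (· ≤ ·)) :
    stepA a (L ++ d :: D') = (1, L ++ D') := by
  unfold stepA
  rw [bisect_match a L d D' hL hd hs]
  have hlt : L.length < (L ++ d :: D').length := by simp
  simp only [hlt, if_pos]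
  rw [List.eraseIdx_append_of_length_le le_rfl]
  simp

theorem stepA_none (a : Int) (Bs : List Int)
    (hBs : ∀ b ∈ Bs, b ≤ a) (hs : Bs.Pairwise (· ≤ ·)) :
    stepA a Bs = (0, Bs.tail) := by
  obtain ⟨h1, h2, h3⟩ := PySem.List.bisectRight_spec Bs a hs
  unfold stepA
  set k := PySem.List.bisectRight Bs a with hk
  have hke : ¬ k < Bs.length := by
    intro hlt
    have := h3 k hlt le_rfl
    have := hBs _ (List.getElem_mem hlt)
    omega
  simp [hke, List.eraseIdx_zero]

theorem stepA_snd_sublist (a : Int) (Bs : List Int) : (stepA a Bs).2.Sublist Bs := by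
  unfold stepA
  split <;> exact List.eraseIdx_sublist _ _

theorem stepA_length (a : Int) (Bs : List Int) (h : Bs ≠ []) :
    (stepA a Bs).2.length + 1 = Bs.length := by
  have hpos : 0 < Bs.length := List.length_pos_iff.mpr h
  unfold stepA
  split <;> rename_i hc <;> simp [List.length_eraseIdx, hc] <;> omega

theorem sorted_decomp (x y : Int) (Bs : List Int)
    (hs : Bs.Pairwise (· ≤ ·)) :
    ∃ P Q R, Bs = P ++ Q ++ R ∧ (∀ p ∈ P, p ≤ x) ∧ (∀ q ∈ Q, x < q ∧ q ≤ y) ∧ (∀ r ∈ R, y < r) := by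
  induction Bs with
  | nil => exact ⟨[], [], [], by simp⟩
  | cons b t ih =>
      obtain ⟨P, Q, R, heq, hP, hQ, hR⟩ := ih hs.of_cons
      have hbt : ∀ c ∈ t, b ≤ c := fun c hc => List.rel_of_pairwise_cons hs hc
      by_cases hbx : b ≤ x
      · refine ⟨b :: P, Q, R, by simp [heq], ?_, hQ, hR⟩
        intro p hp
        rcases List.mem_cons.mp hp with rfl | hp
        · exact hbx
        · exact hP p hp
      · by_cases hby : b ≤ y
        · have hPnil : P = [] := by
            rw [List.eq_nil_iff_forall_not_mem]
            intro p hp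
            have hpt : p ∈ t := by rw [heq]; simp [hp]
            have := hbt p hpt
            have := hP p hp
            omega
          refine ⟨[], b :: Q, R, by simp [heq, hPnil], by simp, ?_, hR⟩
          intro q hq
          rcases List.mem_cons.mp hq with rfl | hq
          · exact ⟨by omega, hby⟩
          · exact hQ q hq
        · have hPnil : P = [] := by
            rw [List.eq_nil_iff_forall_not_mem]
            intro p hp
            have hpt : p ∈ t := by rw [heq]; simp [hp]
            have := hbt p hpt
            have := hP p hp
            omega
          have hQnil : Q = [] := by
            rw [List.eq_nil_iff_forall_not_mem]
            intro q hq
            have hqt : q ∈ t := by rw [heq]; simp [hq]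
            have := hbt q hqt
            have := (hQ q hq).2
            omega
          refine ⟨[], [], b :: R, by simp [heq, hPnil, hQnil], by simp, by simp, ?_⟩
          intro r hr
          rcases List.mem_cons.mp hr with rfl | hr
          · omega
          · exact hR r hr

theorem swap_core (x y : Int) (hxy : x ≤ y) (P Q R : List Int)
    (hP : ∀ p ∈ P, p ≤ x) (hQ : ∀ q ∈ Q, x < q ∧ q ≤ y) (hR : ∀ r ∈ R, y < r)
    (hs : (P ++ Q ++ R).Pairwise (· ≤ ·)) (h2 : 2 ≤ (P ++ Q ++ R).length) :
    (stepA x (P ++ Q ++ R)).1 + (stepA y (stepA x (P ++ Q ++ R)).2).1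
      = (stepA y (P ++ Q ++ R)).1 + (stepA x (stepA y (P ++ Q ++ R)).2).1
    ∧ (stepA y (stepA x (P ++ Q ++ R)).2).2 = (stepA x (stepA y (P ++ Q ++ R)).2).2 := by
  have hPy : ∀ p ∈ P, p ≤ y := fun p hp => le_trans (hP p hp) hxy
  rcases Q with _ | ⟨q, Q'⟩
  · rcases R with _ | ⟨r, R'⟩
    · -- no element beats x or y
      simp only [List.append_nil] at hs h2 ⊢
      have hPt : List.Pairwise (· ≤ ·) P.tail := List.Pairwise.sublist (List.tail_sublist P) hs
      have e1 := stepA_none x P hP hs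
      have e2 := stepA_none y P.tail (fun b hb => hPy b (List.mem_of_mem_tail hb)) hPt
      have f1 := stepA_none y P hPy hs
      have f2 := stepA_none x P.tail (fun b hb => hP b (List.mem_of_mem_tail hb)) hPt
      simp [e1, e2, f1, f2]
    · -- elements beating both x and y exist, none in between
      simp only [List.append_nil] at hs h2 ⊢
      have hyr : y < r := hR r (by simp)
      have hxr : x < r := lt_of_le_of_lt hxy hyr
      have e1 := stepA_match x P r R' hP hxr hs
      have f1 := stepA_match y P r R' hPy hyr hs
      have hsub1 : (P ++ R').Sublist (P ++ r :: R') :=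
        (List.Sublist.refl P).append (List.sublist_cons_self r R')
      have hs1 := List.Pairwise.sublist hsub1 hs
      rcases R' with _ | ⟨r2, R''⟩
      · simp only [List.append_nil] at e1 f1 hs1
        have e2 := stepA_none y P hPy hs1
        have f2 := stepA_none x P hP hs1
        simp [e1, e2, f1, f2]
      · have hyr2 : y < r2 := hR r2 (by simp)
        have e2 := stepA_match y P r2 R'' hPy hyr2 hs1
        have f2 := stepA_match x P r2 R'' hP (lt_of_le_of_lt hxy hyr2) hs1
        simp [e1, e2, f1, f2]
  · rcases R with _ | ⟨r, R'⟩
    · -- elements beating x but not y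
      simp only [List.append_nil] at hs h2 ⊢
      have hq1 := hQ q (by simp)
      have e1 := stepA_match x P q Q' hP hq1.1 hs
      have hPQy : ∀ l ∈ P ++ q :: Q', l ≤ y := by
        intro l hl
        rcases List.mem_append.mp hl with hl | hl
        · exact hPy l hl
        · rcases List.mem_cons.mp hl with rfl | hl
          · exact hq1.2
          · exact (hQ l (by simp [hl])).2
      have f1 := stepA_none y (P ++ q :: Q') hPQy hs
      have hsub1 : (P ++ Q').Sublist (P ++ q :: Q') :=
        (List.Sublist.refl P).append (List.sublist_cons_self q Q')
      have hs1 := List.Pairwise.sublist hsub1 hs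
      have e2 := stepA_none y (P ++ Q') (fun l hl => hPQy l (hsub1.subset hl)) hs1
      rcases P with _ | ⟨p, P'⟩
      · simp only [List.nil_append] at e1 e2 f1 hs hs1 ⊢
        rcases Q' with _ | ⟨q2, Q''⟩
        · simp at h2
        · have hq2 := hQ q2 (by simp)
          have hsQ : List.Pairwise (· ≤ ·) (q2 :: Q'') :=
            List.Pairwise.sublist (List.sublist_cons_self q _) hs
          have f2 : stepA x (q2 :: Q'') = (1, Q'') := by
            simpa using stepA_match x [] q2 Q'' (by simp) hq2.1 (by simpa using hsQ)
          simp [e1, e2, f1, f2]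
      · have hsub2 : (P' ++ q :: Q').Sublist ((p :: P') ++ q :: Q') :=
          (List.sublist_cons_self p P').append (List.Sublist.refl _)
        have hs2 := List.Pairwise.sublist hsub2 hs
        have f2 := stepA_match x P' q Q' (fun l hl => hP l (by simp [hl])) hq1.1 hs2
        simp only [List.cons_append] at e1 e2 f1 f2 ⊢
        simp [e1, e2, f1, f2]
    · -- elements in between and elements beating both
      have hq1 := hQ q (by simp)
      have hr1 := hR r (by simp)
      simp only [List.append_assoc, List.cons_append] at hs h2 ⊢
      have e1 := stepA_match x P q (Q' ++ r :: R') hP hq1.1 hs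
      have hPQ'y : ∀ l ∈ P ++ Q', l ≤ y := by
        intro l hl
        rcases List.mem_append.mp hl with hl | hl
        · exact hPy l hl
        · exact (hQ l (by simp [hl])).2
      have e2 : stepA y (P ++ (Q' ++ r :: R')) = (1, P ++ (Q' ++ R')) := by
        have hsx : ((P ++ Q') ++ r :: R').Pairwise (· ≤ ·) := by
          rw [List.append_assoc]
          exact List.Pairwise.sublist ((List.Sublist.refl P).append (List.sublist_cons_self q _)) hs
        simpa [List.append_assoc] using stepA_match y (P ++ Q') r R' hPQ'y hr1 hsx
      have f1 : stepA y (P ++ q :: (Q' ++ r :: R')) = (1, P ++ q :: (Q' ++ R')) := by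
        have hsx : ((P ++ q :: Q') ++ r :: R').Pairwise (· ≤ ·) := by
          simpa [List.append_assoc, List.cons_append] using hs
        have hPqQ'y : ∀ l ∈ P ++ q :: Q', l ≤ y := by
          intro l hl
          rcases List.mem_append.mp hl with hl | hl
          · exact hPy l hl
          · rcases List.mem_cons.mp hl with rfl | hl
            · exact hq1.2
            · exact (hQ l (by simp [hl])).2
        simpa [List.append_assoc, List.cons_append] using
          stepA_match y (P ++ q :: Q') r R' hPqQ'y hr1 hsx
      have f2 : stepA x (P ++ q :: (Q' ++ R')) = (1, P ++ (Q' ++ R')) := by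
        have hsx : (P ++ q :: (Q' ++ R')).Pairwise (· ≤ ·) := by
          refine List.Pairwise.sublist ?_ hs
          exact (List.Sublist.refl P).append
            (List.Sublist.cons₂ q ((List.Sublist.refl Q').append (List.sublist_cons_self r R')))
        exact stepA_match x P q (Q' ++ R') hP hq1.1 hsx
      simp [e1, e2, f1, f2]

theorem swapA (x y : Int) (Bs : List Int)
    (hs : Bs.Pairwise (· ≤ ·)) (h2 : 2 ≤ Bs.length) :
    (stepA x Bs).1 + (stepA y (stepA x Bs).2).1 = (stepA y Bs).1 + (stepA x (stepA y Bs).2).1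
    ∧ (stepA y (stepA x Bs).2).2 = (stepA x (stepA y Bs).2).2 := by
  rcases le_total x y with h | h
  · obtain ⟨P, Q, R, rfl, hP, hQ, hR⟩ := sorted_decomp x y Bs hs
    exact swap_core x y h P Q R hP hQ hR hs h2
  · obtain ⟨P, Q, R, rfl, hP, hQ, hR⟩ := sorted_decomp y x Bs hs
    obtain ⟨h1, h2'⟩ := swap_core y x h P Q R hP hQ hR hs h2
    exact ⟨h1.symm, h2'.symm⟩

theorem runA_perm {A A' : List Int} (h : A.Perm A') :
    ∀ Bs : List Int, Bs.Pairwise (· ≤ ·) → A.length ≤ Bs.length → runA A Bs = runA A' Bs := by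
  induction h with
  | nil => intro Bs _ _; rfl
  | cons a h ih =>
      intro Bs hs hlen
      have hne : Bs ≠ [] := by
        intro e; subst e; simp at hlen
      have hlen' := stepA_length a Bs hne
      simp only [runA]
      rw [ih (stepA a Bs).2 (List.Pairwise.sublist (stepA_snd_sublist a Bs) hs)
        (by simp at hlen; omega)]
  | swap x y l =>
      intro Bs hs hlen
      have h2 : 2 ≤ Bs.length := by simp at hlen; omega
      obtain ⟨hcnt, hrem⟩ := swapA y x Bs hs h2
      simp only [runA, hrem]
      simp only [Prod.mk.injEq]
      exact ⟨by linarith [hcnt], trivial⟩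
  | trans h1 _ ih1 ih2 =>
      intro Bs hs hlen
      rw [ih1 Bs hs hlen, ih2 Bs hs (by rw [← h1.length_eq]; exact hlen)]

theorem tp_nil (Bs : List Int) : tp [] Bs = 0 := by
  cases Bs <;> rfl

theorem tp_nil_right (As : List Int) : tp As [] = 0 := by
  cases As <;> rfl

theorem tp_skip (As : List Int) : ∀ (L Bs : List Int), (∀ l ∈ L, ∀ a ∈ As, ¬ a < l) →
    tp As (L ++ Bs) = tp As Bs := by
  intro L
  induction L with
  | nil => simp
  | cons l L ih =>
      intro Bs h
      cases As with
      | nil => rw [tp_nil, tp_nil]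
      | cons a As =>
          have hal : ¬ a < l := h l (by simp) a (by simp)
          simpa [tp, hal] using ih Bs (fun x hx b hb => h x (by simp [hx]) b hb)

theorem runA_no_match (As : List Int) : ∀ (Bs : List Int),
    (∀ b ∈ Bs, ∀ a ∈ As, ¬ a < b) → Bs.Pairwise (· ≤ ·) → (runA As Bs).1 = 0 := by
  induction As with
  | nil => intro Bs _ _; simp [runA]
  | cons a As ih =>
      intro Bs h hs
      have hba : ∀ b ∈ Bs, b ≤ a := fun b hb => not_lt.mp (h b hb a (by simp))
      have htail := ih Bs.tail
        (fun b hb a' ha' => h b (List.mem_of_mem_tail hb) a' (by simp [ha']))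
        (List.Pairwise.sublist (List.tail_sublist Bs) hs)
      simp [runA, stepA_none a Bs hba hs, htail]

theorem dropWhile_head_false {p : Int → Bool} : ∀ (l : List Int) {d : Int} {D' : List Int},
    l.dropWhile p = d :: D' → p d = false := by
  intro l
  induction l with
  | nil => intro d D' h; simp [List.dropWhile] at h
  | cons b t ih =>
      intro d D' h
      rw [List.dropWhile_cons] at h
      by_cases hb : p b
      · exact ih (by simpa [hb] using h)
      · simp [hb] at h
        rw [← h.1]
        simpa using hb

theorem runA_sorted_tp (As : List Int) : ∀ (Bs : List Int),
    As.Pairwise (· ≤ ·) → Bs.Pairwise (· ≤ ·) → As.length ≤ Bs.length →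
    (runA As Bs).1 = tp As Bs := by
  induction As with
  | nil => intro Bs _ _ _; simp [runA, tp_nil]
  | cons a As ih =>
      intro Bs hA hB hlen
      have haAs : ∀ a' ∈ As, a ≤ a' := fun a' ha' => List.rel_of_pairwise_cons hA ha'
      have hL : ∀ l ∈ Bs.takeWhile (fun b => decide (b ≤ a)), l ≤ a :=
        fun l hl => by simpa using List.mem_takeWhile_imp hl
      have hBs := (List.takeWhile_append_dropWhile
        (p := fun b => decide (b ≤ a)) (l := Bs)).symm
      cases hD : Bs.dropWhile (fun b => decide (b ≤ a)) with
      | nil =>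
          have hall : ∀ b ∈ Bs, b ≤ a := fun b hb => by
            simpa using List.dropWhile_eq_nil_iff.mp hD b hb
          have h0 := runA_no_match As Bs.tail
            (fun b hb a' ha' => not_lt.mpr (le_trans (hall b (List.mem_of_mem_tail hb)) (haAs a' ha')))
            (List.Pairwise.sublist (List.tail_sublist Bs) hB)
          have htp : tp (a :: As) Bs = 0 := by
            have hsk := tp_skip (a :: As) Bs []
              (fun l hl a'' ha'' => by
                rcases List.mem_cons.mp ha'' with rfl | ha''
                · exact not_lt.mpr (hall l hl)
                · exact not_lt.mpr (le_trans (hall l hl) (haAs a'' ha'')))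
            simpa [tp_nil_right] using hsk
          simp [runA, stepA_none a Bs hall hB, h0, htp]
      | cons d D' =>
          rw [hD] at hBs
          have hd : a < d := by
            have := dropWhile_head_false Bs hD
            simpa using this
          have hBp : (Bs.takeWhile (fun b => decide (b ≤ a)) ++ d :: D').Pairwise (· ≤ ·) :=
            hBs ▸ hB
          have e1 := stepA_match a (Bs.takeWhile (fun b => decide (b ≤ a))) d D' hL hd hBp
          have hnotlt : ∀ l ∈ Bs.takeWhile (fun b => decide (b ≤ a)), ∀ a' ∈ As, ¬ a' < l :=
            fun l hl a' ha' => not_lt.mpr (le_trans (hL l hl) (haAs a' ha'))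
          have hlen' : As.length ≤ ((Bs.takeWhile (fun b => decide (b ≤ a))) ++ D').length := by
            have : Bs.length = ((Bs.takeWhile (fun b => decide (b ≤ a))) ++ d :: D').length := by
              rw [← hBs]
            simp at this ⊢
            simp at hlen
            omega
          have hih := ih ((Bs.takeWhile (fun b => decide (b ≤ a))) ++ D') hA.of_cons
            (List.Pairwise.sublist
              ((List.Sublist.refl _).append (List.sublist_cons_self d D')) hBp)
            hlen'
          have hskL := tp_skip As (Bs.takeWhile (fun b => decide (b ≤ a))) D' hnotlt
          have hskR := tp_skip (a :: As) (Bs.takeWhile (fun b => decide (b ≤ a))) (d :: D')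
            (fun l hl a'' ha'' => by
              rcases List.mem_cons.mp ha'' with rfl | ha''
              · exact not_lt.mpr (hL l hl)
              · exact not_lt.mpr (le_trans (hL l hl) (haAs a'' ha'')))
          conv_lhs => rw [hBs]
          conv_rhs => rw [hBs]
          simp [runA, e1, hih, hskL, hskR, tp, hd]

theorem foldlB (As : List Int) : ∀ (Bs : List Int) (c : Int) (i : Nat),
    (Bs.foldl (fun (st : Int × Nat) b =>
        if st.2 < As.length ∧ As.getD st.2 0 < b then (st.1 + 1, st.2 + 1) else st) (c, i)).1
    = c + tp (As.drop i) Bs := by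
  intro Bs
  induction Bs with
  | nil => intro c i; simp [tp_nil_right]
  | cons b t ih =>
      intro c i
      simp only [List.foldl_cons]
      by_cases h : i < As.length ∧ As.getD i 0 < b
      · have hdrop := List.drop_eq_getElem_cons h.1
        have hgd := List.getD_eq_getElem As 0 h.1
        rw [if_pos h, ih]
        rw [hdrop]
        have hlt : As[i] < b := by rw [← hgd]; exact h.2
        simp [tp, hlt]
        ring
      · rw [if_neg h, ih]
        congr 1
        rcases Nat.lt_or_ge i As.length with hi | hi
        · have hdrop := List.drop_eq_getElem_cons hi
          have hgd := List.getD_eq_getElem As 0 hi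
          have hnlt : ¬ As[i] < b := by
            rw [← hgd]; intro hc; exact h ⟨hi, hc⟩
          rw [hdrop]
          simp [tp, hnlt]
        · rw [List.drop_eq_nil_of_le hi]
          rw [tp_nil, tp_nil]

-- ===== VERDICT (by name: the statement is the Claim_ definition above) =====
theorem solution_spec : Claim_equal_solution := by
  intro A B _ hpre
  unfold Spec_solution solution solution_alt
  have hBp := PySem.List.sorted_pairwise B (fun x => x)
  have hAp := PySem.List.sorted_pairwise A (fun x => x)
  have hpermA := PySem.List.sorted_perm A (fun x => x) false
  have hpermB := PySem.List.sorted_perm B (fun x => x) false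
  have hlen : A.length ≤ (PySem.List.sorted B (fun x => x)).length := by
    rw [hpermB.length_eq]; exact hpre
  rw [foldl_runA]
  rw [runA_perm hpermA.symm _ hBp hlen]
  rw [runA_sorted_tp _ _ hAp hBp (by rw [hpermA.length_eq]; exact hlen)]
  rw [foldlB]
  simp
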